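-- pv_equiv track=rewrite | github.com/Vlad20055/IGI_STRWEB_LABS | IGI/LR3/Task4.py | sort_words_in_revers_order
-- ===== SOURCE A (Python) =====
-- def sort_words_in_revers_order(s: str):
--     words = []
--     word = ""
--
--     for symb in s:
--         if symb == " " or symb == "," or symb == ".":
--             if not word == "": words.append(word)
--             word = ""
--             continue
--         word += symb
--
--     words.sort(key=len, reverse=True)
--     return words
-- ===== SOURCE B (Python) =====
-- def sort_words_in_revers_order(s: str):
--     # One pass: drop each finished word straight into a length bucket,
--     # then emit buckets from the longest length down (stable bucket sort,
--     # replacing the comparison sort).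
--     buckets = {}          # length -> words of that length, in encounter order
--     maxlen = 0
--     word = ""
--     for c in s:
--         if c == " " or c == "," or c == ".":
--             if word != "":
--                 buckets.setdefault(len(word), []).append(word)
--                 if len(word) > maxlen:
--                     maxlen = len(word)
--             word = ""
--         else:
--             word += c
--     res = []
--     L = maxlen
--     while L > 0:
--         res += buckets.get(L, [])
--         L -= 1
--     return res
-- ===== Notes on version B (the rewrite author's own statement) =====
-- stated objective: alternative
-- what changed: B replaces the comparison sort (sort with key=len, reverse=True) by a stable bucket sort: each finished word is dropped into a length-indexed dict during the single character scan, and the result is emitted by walking buckets from the maximum length down, never materialising the intermediate words list.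
import Mathlib
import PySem

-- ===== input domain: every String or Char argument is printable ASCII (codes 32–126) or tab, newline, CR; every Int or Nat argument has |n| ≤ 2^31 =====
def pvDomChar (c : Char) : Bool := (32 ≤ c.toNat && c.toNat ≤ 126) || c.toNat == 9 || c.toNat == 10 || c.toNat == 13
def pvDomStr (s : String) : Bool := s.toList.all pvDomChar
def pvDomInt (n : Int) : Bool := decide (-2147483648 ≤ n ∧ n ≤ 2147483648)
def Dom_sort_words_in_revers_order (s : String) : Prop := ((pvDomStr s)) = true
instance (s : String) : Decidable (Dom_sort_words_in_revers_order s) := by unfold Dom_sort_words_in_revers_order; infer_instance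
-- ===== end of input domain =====

-- B replaces A's comparison sort by a stable length-bucket sort built during the scan; proved to return A's exact value on every input.


-- ===== PORT A =====
-- loop body of A: state (words, word) — word kept as List Char ('word += symb' is exact there)
def pvStepA (st : List String × List Char) (symb : Char) : List String × List Char :=
  if symb = ' ' ∨ symb = ',' ∨ symb = '.' then
    (if st.2 ≠ [] then st.1 ++ [String.ofList st.2] else st.1, [])
  else (st.1, st.2 ++ [symb])

def sort_words_in_revers_order (s : String) : List String :=
  let r := s.toList.foldl pvStepA ([], [])
  PySem.List.sorted r.1 PySem.Str.len true

-- ===== PORT B =====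
-- loop body of B: state (buckets, maxlen, word)
def pvStepB (st : PySem.Dict Int (List String) × Int × List Char) (c : Char) :
    PySem.Dict Int (List String) × Int × List Char :=
  if c = ' ' ∨ c = ',' ∨ c = '.' then
    if st.2.2 ≠ [] then
      let w := String.ofList st.2.2
      (st.1.modify (PySem.Str.len w) [] (· ++ [w]),
       if PySem.Str.len w > st.2.1 then PySem.Str.len w else st.2.1, [])
    else (st.1, st.2.1, [])
  else (st.1, st.2.1, st.2.2 ++ [c])

-- B's 'while L > 0: res += buckets.get(L, []); L -= 1'
def pvEmitB (d : PySem.Dict Int (List String)) (L : Int) (res : List String) : List String :=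
  if 0 < L then pvEmitB d (L - 1) (res ++ d.getD L []) else res
termination_by L.toNat
decreasing_by omega

def sort_words_in_revers_order_alt (s : String) : List String :=
  let r := s.toList.foldl pvStepB (PySem.Dict.empty, 0, [])
  pvEmitB r.1 r.2.1 []

-- ===== PRECONDITION & SPEC =====
def Spec_sort_words_in_revers_order (s : String) (out : List String) : Prop := out = sort_words_in_revers_order_alt s
instance (s : String) (out : List String) : Decidable (Spec_sort_words_in_revers_order s out) := by unfold Spec_sort_words_in_revers_order; infer_instance

-- ===== CLAIM (what is proved, stated in full; the proofs are below) =====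
def Claim_equal_sort_words_in_revers_order : Prop := ∀ (s : String), Dom_sort_words_in_revers_order s → Spec_sort_words_in_revers_order s (sort_words_in_revers_order s)

-- ===== LEMMAS AND PROOFS =====

-- the dict and maxlen that B's scan maintains, as functions of A's word list
def pvDictOf (ws : List String) : PySem.Dict Int (List String) :=
  ws.foldl (fun d w => d.modify (PySem.Str.len w) [] (· ++ [w])) PySem.Dict.empty

def pvMaxOf (ws : List String) : Int :=
  ws.foldl (fun m w => if PySem.Str.len w > m then PySem.Str.len w else m) 0

-- B's scan tracks (pvDictOf ws, pvMaxOf ws, word) for A's scan state (ws, word)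
theorem pvScan_corr (cs : List Char) : ∀ (ws : List String) (word : List Char),
    cs.foldl pvStepB (pvDictOf ws, pvMaxOf ws, word) =
      (pvDictOf (cs.foldl pvStepA (ws, word)).1, pvMaxOf (cs.foldl pvStepA (ws, word)).1,
        (cs.foldl pvStepA (ws, word)).2) := by
  induction cs with
  | nil => intro ws word; rfl
  | cons c cs ih =>
    intro ws word
    by_cases hd : c = ' ' ∨ c = ',' ∨ c = '.'
    · by_cases hw : word = []
      · simp only [List.foldl_cons, pvStepA, pvStepB, hd, hw]
        simpa using ih ws []
      · have h1 : pvDictOf (ws ++ [String.ofList word]) =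
            (pvDictOf ws).modify (PySem.Str.len (String.ofList word)) [] (· ++ [String.ofList word]) := by
          simp [pvDictOf, List.foldl_append]
        have h2 : pvMaxOf (ws ++ [String.ofList word]) =
            (if PySem.Str.len (String.ofList word) > pvMaxOf ws then PySem.Str.len (String.ofList word)
             else pvMaxOf ws) := by
          simp [pvMaxOf, List.foldl_append]
        simp only [List.foldl_cons, pvStepA, pvStepB, hd, hw]
        simp only [ne_eq, hw, not_false_iff, if_true, if_pos, ← h1, ← h2]
        simpa using ih (ws ++ [String.ofList word]) []
    · simp only [List.foldl_cons, pvStepA, pvStepB, hd]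
      simpa using ih ws (word ++ [c])

-- the bucket of length L is the subsequence of words of that length
theorem pvDictOf_getD (ws : List String) (L : Int) :
    (pvDictOf ws).getD L [] = ws.filter (fun w => PySem.Str.len w == L) := by
  have h : pvDictOf ws =
      (ws.map (fun w => (PySem.Str.len w, w))).foldl
        (fun d p => d.modify p.1 [] (· ++ [p.2])) PySem.Dict.empty := by
    simp [pvDictOf, List.foldl_map]
  rw [h, PySem.Dict.getD_foldl_modify_append]
  induction ws with
  | nil => rfl
  | cons w ws ih =>
    by_cases hw : PySem.Str.len w == L <;>
      simp_all [List.filter_cons, List.filter_map, Function.comp_def]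

-- every word is bounded by pvMaxOf, and pvMaxOf is nonnegative
theorem pvMaxOf_aux (ws : List String) : ∀ (m : Int),
    m ≤ ws.foldl (fun m w => if PySem.Str.len w > m then PySem.Str.len w else m) m ∧
    ∀ w ∈ ws, PySem.Str.len w ≤
      ws.foldl (fun m w => if PySem.Str.len w > m then PySem.Str.len w else m) m := by
  induction ws with
  | nil => intro m; simp
  | cons x ws ih =>
    intro m
    simp only [List.foldl_cons, List.mem_cons]
    constructor
    · refine le_trans ?_ ((ih _).1)
      split_ifs with h <;> omega
    · rintro w (rfl | hw)
      · refine le_trans ?_ ((ih _).1)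
        split_ifs with h <;> omega
      · exact (ih _).2 w hw

theorem pvMaxOf_nonneg (ws : List String) : 0 ≤ pvMaxOf ws := (pvMaxOf_aux ws 0).1

theorem pvLen_le_maxOf (ws : List String) (w : String) (hw : w ∈ ws) :
    PySem.Str.len w ≤ pvMaxOf ws := (pvMaxOf_aux ws 0).2 w hw

-- words produced by A's scan are nonempty
theorem pvScanA_words_pos (cs : List Char) : ∀ (ws : List String) (word : List Char),
    (∀ w ∈ ws, 1 ≤ PySem.Str.len w) →
    ∀ w ∈ (cs.foldl pvStepA (ws, word)).1, 1 ≤ PySem.Str.len w := by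
  induction cs with
  | nil => intro ws word h; exact h
  | cons c cs ih =>
    intro ws word h
    by_cases hd : c = ' ' ∨ c = ',' ∨ c = '.'
    · by_cases hw : word = []
      · simp only [List.foldl_cons, pvStepA, hd, hw]
        simpa using ih ws [] h
      · simp only [List.foldl_cons, pvStepA, hd]
        simp only [ne_eq, hw, not_false_iff, if_true, if_pos]
        refine ih _ _ ?_
        intro w hmem
        rcases List.mem_append.mp hmem with h1 | h1
        · exact h w h1
        · simp only [List.mem_singleton] at h1
          subst h1
          simp only [PySem.Str.len, String.toList_ofList]
          have : word.length ≠ 0 := by simpa [List.length_eq_zero_iff] using hw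
          omega
    · simp only [List.foldl_cons, pvStepA, hd]
      simpa using ih ws (word ++ [c]) h

-- descending bucket concatenation, on Nat fuel
def pvConcatDesc (ws : List String) : Nat → List String
  | 0 => []
  | n + 1 => ws.filter (fun w => PySem.Str.len w == ((n : Int) + 1)) ++ pvConcatDesc ws n

theorem pvConcatDesc_nil (n : Nat) : pvConcatDesc [] n = [] := by
  induction n with
  | zero => rfl
  | succ n ih => simp [pvConcatDesc, ih]

theorem pvMem_concatDesc (ws : List String) (n : Nat) (y : String)
    (hy : y ∈ pvConcatDesc ws n) : PySem.Str.len y ≤ (n : Int) := by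
  induction n with
  | zero => simp [pvConcatDesc] at hy
  | succ n ih =>
    simp only [pvConcatDesc, List.mem_append] at hy
    rcases hy with h | h
    · have := (List.mem_filter.mp h).2
      simp only [beq_iff_eq] at this
      omega
    · have := ih h; omega

-- concatDesc below the new word's length ignores it
theorem pvConcatDesc_append_high (ws : List String) (x : String) (n : Nat)
    (hx : (n : Int) < PySem.Str.len x) : pvConcatDesc (ws ++ [x]) n = pvConcatDesc ws n := by
  induction n with
  | zero => rfl
  | succ n ih =>
    have hx' : (PySem.Str.len x == ((n : Int) + 1)) = false := by
      simp only [beq_eq_false_iff_ne, ne_eq]; intro h; omega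
    simp only [pvConcatDesc, List.filter_append, List.filter_cons, hx', Bool.false_eq_true,
      if_false]
    simp only [List.filter_nil, List.append_nil]
    rw [ih (by omega)]

-- insertBy passes a prefix it does not go before
theorem pvInsertBy_pass (bf : String → String → Bool) (x : String) :
    ∀ (P Q : List String), (∀ y ∈ P, bf x y = false) →
    PySem.List.insertBy bf x (P ++ Q) = P ++ PySem.List.insertBy bf x Q := by
  intro P
  induction P with
  | nil => intro Q _; rfl
  | cons p P ih =>
    intro Q h
    have hp : bf x p = false := h p (by simp)
    simp only [List.cons_append, PySem.List.insertBy, hp, Bool.false_eq_true, if_false]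
    rw [ih Q (fun y hy => h y (by simp [hy]))]

-- insertBy lands exactly between a not-before prefix and an all-before suffix
theorem pvInsertBy_split (bf : String → String → Bool) (x : String)
    (P Q : List String) (hP : ∀ y ∈ P, bf x y = false) (hQ : ∀ y ∈ Q, bf x y = true) :
    PySem.List.insertBy bf x (P ++ Q) = P ++ x :: Q := by
  rw [pvInsertBy_pass bf x P Q hP]
  congr 1
  cases Q with
  | nil => rfl
  | cons q Q => simp [PySem.List.insertBy, hQ q (by simp)]

-- inserting x into the descending bucket concatenation appends it to its bucket
theorem pvInsert_concatDesc (ws : List String) (x : String) (n : Nat)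
    (h1 : 1 ≤ PySem.Str.len x) (h2 : PySem.Str.len x ≤ (n : Int)) :
    PySem.List.insertBy (fun a b => decide (PySem.Str.len b < PySem.Str.len a)) x
      (pvConcatDesc ws n) = pvConcatDesc (ws ++ [x]) n := by
  induction n with
  | zero => omega
  | succ n ih =>
    by_cases hx : PySem.Str.len x = (n : Int) + 1
    · have hxb : (PySem.Str.len x == ((n : Int) + 1)) = true := beq_iff_eq.mpr hx
      simp only [pvConcatDesc, List.filter_append, List.filter_cons, hxb, List.filter_nil]
      rw [pvConcatDesc_append_high ws x n (by omega)]
      rw [pvInsertBy_split]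
      · simp
      · intro y hy
        have h3 := (List.mem_filter.mp hy).2
        simp only [beq_iff_eq, PySem.Str.len] at h3 hx
        simp only [decide_eq_false_iff_not, not_lt, PySem.Str.len]
        omega
      · intro y hy
        have := pvMem_concatDesc ws n y hy
        simp only [decide_eq_true_eq]
        omega
    · have hxb : (PySem.Str.len x == ((n : Int) + 1)) = false := by
        simp only [beq_eq_false_iff_ne, ne_eq]; exact hx
      simp only [pvConcatDesc, List.filter_append, List.filter_cons, hxb, Bool.false_eq_true,
        if_false]
      simp only [List.filter_nil, List.append_nil]
      rw [pvInsertBy_pass]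
      · rw [ih (by omega)]
      · intro y hy
        have := (List.mem_filter.mp hy).2
        simp only [beq_iff_eq] at this
        simp only [decide_eq_false_iff_not, not_lt, this]
        omega

-- the stable descending sort by length IS the descending bucket concatenation
theorem pvSorted_eq_concatDesc (ws : List String) (n : Nat)
    (h : ∀ w ∈ ws, 1 ≤ PySem.Str.len w ∧ PySem.Str.len w ≤ (n : Int)) :
    PySem.List.sorted ws PySem.Str.len true = pvConcatDesc ws n := by
  induction ws using List.reverseRecOn with
  | nil => simp [pvConcatDesc_nil, PySem.List.sorted]
  | append_singleton ws x ih =>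
    rw [PySem.List.sorted_rev_eq_foldl_insertBy, List.foldl_append]
    simp only [List.foldl_cons, List.foldl_nil]
    rw [← PySem.List.sorted_rev_eq_foldl_insertBy]
    rw [ih (fun w hw => h w (by simp [hw]))]
    exact pvInsert_concatDesc ws x n (h x (by simp)).1 (h x (by simp)).2

-- B's emit loop computes the descending bucket concatenation
def pvConcatDescD (d : PySem.Dict Int (List String)) : Nat → List String
  | 0 => []
  | n + 1 => d.getD ((n : Int) + 1) [] ++ pvConcatDescD d n

theorem pvEmitB_concat (d : PySem.Dict Int (List String)) : ∀ (n : Nat) (res : List String),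
    pvEmitB d (n : Int) res = res ++ pvConcatDescD d n := by
  intro n
  induction n with
  | zero => intro res; rw [pvEmitB]; simp [pvConcatDescD]
  | succ n ih =>
    intro res
    rw [pvEmitB]
    have hpos : (0 : Int) < ((n : Nat) + 1 : Nat) := by push_cast; omega
    rw [if_pos hpos]
    have hcast : ((((n : Nat) + 1 : Nat) : Int) - 1) = ((n : Nat) : Int) := by push_cast; omega
    rw [hcast, ih]
    simp only [pvConcatDescD]
    have : (d.getD (((n : Nat) + 1 : Nat) : Int) []) = d.getD (((n : Nat) : Int) + 1) [] := by
      norm_cast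
    rw [this, List.append_assoc]

theorem pvConcatDescD_eq (ws : List String) (n : Nat) :
    pvConcatDescD (pvDictOf ws) n = pvConcatDesc ws n := by
  induction n with
  | zero => rfl
  | succ n ih => simp [pvConcatDescD, pvConcatDesc, pvDictOf_getD, ih]

-- ===== VERDICT (by name: the statement is the Claim_ definition above) =====
theorem sort_words_in_revers_order_spec : Claim_equal_sort_words_in_revers_order := by
  intro s _
  unfold Spec_sort_words_in_revers_order sort_words_in_revers_order sort_words_in_revers_order_alt
  have hscan := pvScan_corr s.toList [] []
  have h0 : (pvDictOf [], pvMaxOf [], ([] : List Char)) =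
      ((PySem.Dict.empty : PySem.Dict Int (List String)), (0 : Int), ([] : List Char)) := rfl
  rw [h0] at hscan
  rw [hscan]
  set ws := (s.toList.foldl pvStepA ([], [])).1 with hws
  have hpos : ∀ w ∈ ws, 1 ≤ PySem.Str.len w :=
    pvScanA_words_pos s.toList [] [] (by simp)
  have hM : 0 ≤ pvMaxOf ws := pvMaxOf_nonneg ws
  have hcast : ((pvMaxOf ws).toNat : Int) = pvMaxOf ws := Int.toNat_of_nonneg hM
  rw [show pvMaxOf ws = ((pvMaxOf ws).toNat : Int) from hcast.symm]
  rw [pvEmitB_concat, pvConcatDescD_eq]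
  simp only [List.nil_append]
  exact pvSorted_eq_concatDesc ws (pvMaxOf ws).toNat
    (fun w hw => ⟨hpos w hw, by rw [hcast]; exact pvLen_le_maxOf ws w hw⟩)
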